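-- pv_equiv track=rewrite | github.com/rpa0309/algop2 | program1.py | program1
-- ===== SOURCE A (Python) =====
-- from typing import List, Tuple
--
-- def program1(n: int, k: int, values: List[int]) -> Tuple[int, List[int]]:
--     """
--     Solution to Program 1
--
--     Parameters:
--     n (int): number of vaults
--     k (int): no two chosen vaults are within k positions of each other
--     values (List[int]): the values of the vaults
--
--     Returns:
--     int:  maximal total value
--     List[int]: the indices of the chosen vaults(1-indexed)
--
--     """
--
--     ############################
--     # Add you code here
--     # iteratively select the last available vault starting at the end of the list until there are no more available vaults
--     max = 0
--     vaultsSelected = []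
--     i = n-1
--     while(i > -1):
--         max += values[i]
--         vaultsSelected.append(i+1)
--         i -= k+1
--
--     ############################
--     vaultsSelected.sort()
--     return max, vaultsSelected # replace with your code
-- ===== SOURCE B (Python) =====
-- from typing import List, Tuple
--
-- def program1(n: int, k: int, values: List[int]) -> Tuple[int, List[int]]:
--     # A vault (0-indexed i) is chosen iff i is congruent to n-1 modulo k+1:
--     # instead of jump-walking backward and sorting, scan the prefix once
--     # with enumerate and select by that congruence test, accumulating
--     # the total and the ascending 1-indexed positions as we go.
--     if n <= 0:
--         return 0, []
--     step = k + 1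
--     r = (n - 1) % step
--     total = 0
--     chosen = []
--     for i, v in enumerate(values[:n]):
--         if i % step == r:
--             total += v
--             chosen.append(i + 1)
--     return total, chosen
-- ===== Notes on version B (the rewrite author's own statement) =====
-- stated objective: alternative
-- what changed: Replaces A's backward jump-walk (visit only every (k+1)-th position from the end, then sort) by a single forward scan of enumerate(values[:n]) that tests every position once against the congruence i % (k+1) == (n-1) % (k+1), accumulating total and ascending 1-indexed positions directly with no sort.
import Mathlib
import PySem

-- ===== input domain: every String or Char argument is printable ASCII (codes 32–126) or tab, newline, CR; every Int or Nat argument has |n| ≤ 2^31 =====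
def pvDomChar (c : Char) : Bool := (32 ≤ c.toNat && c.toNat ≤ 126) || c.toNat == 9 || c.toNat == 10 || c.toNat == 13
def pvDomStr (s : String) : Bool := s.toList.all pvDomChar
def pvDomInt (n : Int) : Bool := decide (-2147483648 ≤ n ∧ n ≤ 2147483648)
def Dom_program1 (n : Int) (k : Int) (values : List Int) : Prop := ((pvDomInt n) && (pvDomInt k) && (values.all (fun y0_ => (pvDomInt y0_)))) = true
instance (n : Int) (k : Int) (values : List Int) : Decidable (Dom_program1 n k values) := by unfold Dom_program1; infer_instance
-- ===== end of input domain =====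

-- B replaces A's backward jump-walk plus final sort by ONE forward scan of
-- enumerate(values[:n]) that selects each position by the congruence test
-- i % (k+1) == (n-1) % (k+1), accumulating the total and the ascending
-- 1-indexed positions directly.

-- ===== PORT A =====
-- A's while-loop; fuel (n.toNat + 1) only makes the definition total — inside Pre_ the
-- loop stops by itself (the index drops by k+1 ≥ 1 each step), and `none` from pyGet?
-- (Python's IndexError) stops with the state reached so far, unreached inside Pre_.
def program1Loop (values : List Int) (c : Int) : Nat → Int → Int → List Int → Int × List Int
  | 0, _, m, vs => (m, vs)
  | fuel + 1, i, m, vs =>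
    if i > -1 then
      match PySem.List.pyGet? values i with
      | some v => program1Loop values c fuel (i - c) (m + v) (vs ++ [i + 1])
      | none => (m, vs)
    else (m, vs)

def program1 (n : Int) (k : Int) (values : List Int) : Int × List Int :=
  let r := program1Loop values (k + 1) (n.toNat + 1) (n - 1) 0 []
  (r.1, PySem.List.sorted r.2 (fun x => x) false)

-- ===== PORT B =====
def program1_alt (n : Int) (k : Int) (values : List Int) : Int × List Int :=
  if n ≤ 0 then (0, [])
  else
    let step := k + 1
    let r := PySem.Int.mod (n - 1) step
    (PySem.List.enumerate (PySem.List.slice values none (some n)) 0).foldl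
      (fun acc p =>
        if PySem.Int.mod p.1 step = r then (acc.1 + p.2, acc.2 ++ [p.1 + 1]) else acc)
      (0, [])

-- ===== PRECONDITION & SPEC =====
-- Pre_ is exactly where A returns: for n ≥ 1 it reads values[n-1], values[n-1-(k+1)], …,
-- so it needs n ≤ len(values) and k ≥ 0 (k = -1 diverges, k ≤ -2 walks up and raises
-- IndexError); for n ≤ 0 the loop never runs and A returns (0, []) for any k.
def Pre_program1 (n : Int) (k : Int) (values : List Int) : Prop :=
  n ≤ 0 ∨ (0 ≤ k ∧ n ≤ (values.length : Int))
instance (n : Int) (k : Int) (values : List Int) : Decidable (Pre_program1 n k values) := by unfold Pre_program1; infer_instance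

def pvWitness_program1 : Int × Int × List Int := (5, 1, [3, -2, 7, 4, 6])

def Spec_program1 (n : Int) (k : Int) (values : List Int) (out : Int × List Int) : Prop := out = program1_alt n k values
instance (n : Int) (k : Int) (values : List Int) (out : Int × List Int) : Decidable (Spec_program1 n k values out) := by unfold Spec_program1; infer_instance

-- ===== CLAIM (what is proved, stated in full; the proofs are below) =====
def Claim_equal_program1 : Prop := ∀ (n : Int) (k : Int) (values : List Int), Dom_program1 n k values → Pre_program1 n k values → Spec_program1 n k values (program1 n k values)

-- ===== LEMMAS AND PROOFS =====

-- B's selected index list, as the strided range: start = i % c, stop = i + 1.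
def pvR (c i : Int) : List Int := PySem.List.pyRange (PySem.Int.mod i c) (i + 1) c

theorem pvR_neg {c i : Int} (hc : 1 ≤ c) (hi : i < 0) : pvR c i = [] := by
  unfold pvR
  rw [PySem.List.pyRange_of_pos _ _ (by omega : (0:Int) < c)]
  have h0 : 0 ≤ PySem.Int.mod i c := PySem.Int.mod_nonneg i (by omega)
  rw [if_neg (by omega)]
  simp

theorem pvR_step {c i : Int} (hc : 1 ≤ c) (hi : 0 ≤ i) :
    pvR c i = pvR c (i - c) ++ [i] := by
  have hc0 : (0:Int) < c := by omega
  unfold pvR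
  rw [PySem.Int.mod_eq_emod_of_pos hc0, PySem.Int.mod_eq_emod_of_pos hc0,
      PySem.List.pyRange_of_pos _ _ hc0, PySem.List.pyRange_of_pos _ _ hc0]
  have hse : (i - c) % c = i % c := Int.sub_emod_right i c
  rw [hse]
  set s := i % c with hs
  have hs0 : 0 ≤ s := Int.emod_nonneg i (by omega)
  have hsc : s < c := Int.emod_lt_of_pos i hc0
  have hq : c * (i / c) + s = i := Int.mul_ediv_add_emod i c
  have hqnn : 0 ≤ i / c := Int.ediv_nonneg hi (le_of_lt hc0)
  have hnn : 0 ≤ c * (i / c) := mul_nonneg (by omega) hqnn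
  have hcount1 : (i + 1 - s + c - 1) / c = i / c + 1 := by
    have he : i + 1 - s + c - 1 = c * (i / c + 1) := by
      have : c * (i / c + 1) = c * (i / c) + c := by ring
      omega
    rw [he, Int.mul_ediv_cancel_left _ (by omega : c ≠ 0)]
  by_cases hic : i < c
  · have hq0 : i / c = 0 := Int.ediv_eq_zero_of_lt hi hic
    have hcz : c * (i / c) = 0 := by rw [hq0, mul_zero]
    have hsi : s = i := by omega
    rw [if_pos (by omega), if_neg (by omega), hcount1, hq0]
    simp [hsi]
  · have hi2 : 0 ≤ i - c := by omega
    have hq2 : c * ((i - c) / c) + s = i - c := by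
      have := Int.mul_ediv_add_emod (i - c) c; rw [hse] at this; omega
    have hq2nn : 0 ≤ (i - c) / c := Int.ediv_nonneg hi2 (le_of_lt hc0)
    have hnn2 : 0 ≤ c * ((i - c) / c) := mul_nonneg (by omega) hq2nn
    have hcount2 : (i - c + 1 - s + c - 1) / c = (i - c) / c + 1 := by
      have he : i - c + 1 - s + c - 1 = c * ((i - c) / c + 1) := by
        have : c * ((i - c) / c + 1) = c * ((i - c) / c) + c := by ring
        omega
      rw [he, Int.mul_ediv_cancel_left _ (by omega : c ≠ 0)]
    have hdiv : (i - c) / c + 1 = i / c := by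
      have h1 : c * ((i - c) / c) + c = c * (i / c) → (i - c) / c + 1 = i / c := by
        intro h
        have := mul_left_cancel₀ (show c ≠ 0 by omega)
          (show c * ((i - c) / c + 1) = c * (i / c) by rw [mul_add, mul_one]; omega)
        omega
      apply h1; omega
    rw [if_pos (by omega), if_pos (by omega), hcount1, hcount2, hdiv]
    have ht : (i / c + 1).toNat = (i / c).toNat + 1 := by omega
    rw [ht, List.range_succ, List.map_append]
    congr 1
    simp only [List.map_cons, List.map_nil]
    congr 1
    have : (c : Int) * ((i / c).toNat : Int) = c * (i / c) := by
      congr 1; omega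
    omega

theorem pvR_pairwise {c i : Int} (hc : 1 ≤ c) : (pvR c i).Pairwise (· < ·) := by
  unfold pvR
  rw [PySem.List.pyRange_of_pos _ _ (by omega : (0:Int) < c)]
  refine List.Pairwise.map _ (fun a b (h : a < b) => ?_) (List.pairwise_lt_range)
  have : (a : Int) < (b : Int) := by exact_mod_cast h
  nlinarith

-- A's loop computes the strided-range sum and index list reversed (fuel bound i < c * fuel).
theorem program1Loop_eq (values : List Int) (c : Int) (hc : 1 ≤ c) :
    ∀ (fuel : Nat) (i m : Int) (vs : List Int), i < (values.length : Int) → i < c * fuel →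
      program1Loop values c fuel i m vs =
        (m + (pvR c i).foldl (fun acc j => acc + PySem.List.pyGetD values j 0) 0,
         vs ++ ((pvR c i).map (fun j => j + 1)).reverse) := by
  intro fuel
  induction fuel with
  | zero =>
    intro i m vs hilen hif
    have hi : i < 0 := by simpa using hif
    simp [program1Loop, pvR_neg hc hi]
  | succ f ih =>
    intro i m vs hilen hif
    by_cases hi : i > -1
    · have hi0 : (0:Int) ≤ i := by omega
      have hget : PySem.List.pyGet? values i = some values[i.toNat] :=
        PySem.List.pyGet?_eq_some_getElem values hi0 (by simpa using hilen)
      simp only [program1Loop, if_pos hi, hget]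
      rw [ih (i - c) (m + values[i.toNat]) (vs ++ [i + 1]) (by omega)
        (by have hexp : c * ((f : Int) + 1) = c * (f : Int) + c := by ring
            push_cast at hif; omega)]
      rw [pvR_step hc hi0, Prod.mk.injEq]
      refine ⟨?_, ?_⟩
      · rw [List.foldl_append]
        simp only [List.foldl_cons, List.foldl_nil]
        rw [PySem.List.pyGetD_eq_getElem values 0 hi0 (by simpa using hilen)]
        ring
      · rw [List.map_append, List.reverse_append]
        simp
    · have hneg : i < 0 := by omega
      simp [program1Loop, if_neg hi, pvR_neg hc hneg]

-- enumerate written as a map over List.range (B's scan, made index-explicit).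
theorem enumerate_eq_map_range (L : List Int) :
    ∀ s : Int, PySem.List.enumerate L s =
      (List.range L.length).map (fun (t : Nat) => (s + (t : Int), L.getD t 0)) := by
  induction L with
  | nil => intro s; simp [PySem.List.enumerate_nil]
  | cons x xs ih =>
    intro s
    rw [PySem.List.enumerate_cons, ih (s + 1)]
    simp only [List.length_cons, List.range_succ_eq_map, List.map_cons, List.map_map]
    refine List.cons_eq_cons.mpr ⟨by simp, ?_⟩
    refine List.map_congr_left (fun t _ => ?_)
    simp only [Function.comp_apply, List.getD_cons_succ]
    refine Prod.ext ?_ rfl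
    push_cast; ring

-- peel the top element off a strided range: range(r, b+1, c) vs range(r, b, c).
theorem pyRange_top_succ {c r b : Int} (hc : 1 ≤ c) (hr0 : 0 ≤ r) (hrc : r < c) (hb : 0 ≤ b) :
    PySem.List.pyRange r (b + 1) c =
      PySem.List.pyRange r b c ++ (if b % c = r then [b] else []) := by
  have hc0 : (0:Int) < c := by omega
  rw [PySem.List.pyRange_of_pos _ _ hc0, PySem.List.pyRange_of_pos _ _ hc0]
  by_cases hbr : b < r
  · have hmod : b % c = b := Int.emod_eq_of_lt hb (by omega)
    rw [if_neg (by omega), if_neg (by omega), if_neg (by omega)]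
    simp
  · -- b ≥ r; write d = b - r = c * q + s
    have hd0 : 0 ≤ b - r := by omega
    set d := b - r with hdset
    set q := d / c with hqset
    set s := d % c with hsset
    have hq : c * q + s = d := Int.mul_ediv_add_emod d c
    have hs0 : 0 ≤ s := Int.emod_nonneg d (by omega)
    have hsc : s < c := Int.emod_lt_of_pos d hc0
    have hqnn : 0 ≤ q := Int.ediv_nonneg hd0 (le_of_lt hc0)
    have hnn : 0 ≤ c * q := mul_nonneg (by omega) hqnn
    have hbd : b = r + d := by omega
    have hrr : r % c = r := Int.emod_eq_of_lt hr0 hrc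
    have hbmodrs : b % c = (r + s) % c := by
      conv_lhs => rw [hbd]
      rw [Int.add_emod, hrr]
    have hcount1 : (b + 1 - r + c - 1) / c = q + 1 := by
      have he : b + 1 - r + c - 1 = d + c * 1 := by omega
      rw [he, Int.add_mul_ediv_left _ _ (by omega : c ≠ 0)]
    by_cases hs : s = 0
    · -- b ≡ r (mod c): one more element, namely b itself
      have hbmod : b % c = r := by
        rw [hbmodrs, hs, add_zero, hrr]
      rw [if_pos hbmod, if_pos (by omega)]
      by_cases hd : d = 0
      · -- b = r: left range is the singleton [r], right range is empty
        have hq0 : q = 0 := by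
          rw [hqset, hdset]; rw [show b - r = 0 by omega]; simp
        rw [if_neg (by omega), hcount1, hq0]
        simp [show r = b by omega]
      · have hcount0 : (b - r + c - 1) / c = q := by
          have he : b - r + c - 1 = (c - 1) + c * q := by omega
          rw [he, Int.add_mul_ediv_left _ _ (by omega : c ≠ 0),
              Int.ediv_eq_zero_of_lt (by omega) (by omega), zero_add]
        rw [if_pos (by omega), hcount0, hcount1]
        have ht : (q + 1).toNat = q.toNat + 1 := by omega
        rw [ht, List.range_succ, List.map_append]
        congr 1
        simp only [List.map_cons, List.map_nil]
        congr 1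
        have : (c : Int) * (q.toNat : Int) = c * q := by congr 1; omega
        omega
    · -- b ≢ r (mod c): counts agree, nothing is appended
      have hbmod : b % c ≠ r := by
        rw [hbmodrs]
        by_cases hlt : r + s < c
        · rw [Int.emod_eq_of_lt (by omega) hlt]; omega
        · have h1 : (r + s) % c = (r + s - c) % c := (Int.sub_emod_right (r + s) c).symm
          rw [h1, Int.emod_eq_of_lt (by omega) (by omega)]; omega
      have hdpos : 0 < d := by
        rcases lt_or_eq_of_le hd0 with h | h
        · omega
        · exfalso; apply hs; rw [hsset, ← h]; simp
      have hcount0 : (b - r + c - 1) / c = q + 1 := by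
        have hcq1 : c * (q + 1) = c * q + c := by ring
        have he : b - r + c - 1 = (s - 1) + c * (q + 1) := by omega
        rw [he, Int.add_mul_ediv_left _ _ (by omega : c ≠ 0),
            Int.ediv_eq_zero_of_lt (by omega) (by omega), zero_add]
      rw [if_neg hbmod, if_pos (by omega), if_pos (by omega), hcount0, hcount1]
      simp

-- B's congruence filter over List.range IS the strided range.
theorem filter_range_eq_pyRange {c r : Int} (hc : 1 ≤ c) (hr0 : 0 ≤ r) (hrc : r < c) :
    ∀ nn : Nat, ((List.range nn).filter (fun (t : Nat) => decide (((t : Int)) % c = r))).map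
        (fun (t : Nat) => (t : Int)) = PySem.List.pyRange r nn c := by
  intro nn
  induction nn with
  | zero =>
    rw [PySem.List.pyRange_of_pos _ _ (by omega : (0:Int) < c)]
    rw [if_neg (by push_cast; omega)]
    simp
  | succ m ih =>
    rw [List.range_succ, List.filter_append, List.map_append, ih]
    rw [show ((m + 1 : Nat) : Int) = (m : Int) + 1 by push_cast; ring,
        pyRange_top_succ hc hr0 hrc (by positivity)]
    congr 1
    by_cases hm : (m : Int) % c = r
    · rw [if_pos hm]; simp [hm]
    · rw [if_neg hm]; simp [hm]

-- shape of B's accumulating fold: total and chosen positions of the filtered pairs.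
theorem fold_select_eq (c r : Int) :
    ∀ (ps : List (Int × Int)) (m : Int) (vs : List Int),
      ps.foldl (fun acc p =>
          if PySem.Int.mod p.1 c = r then (acc.1 + p.2, acc.2 ++ [p.1 + 1]) else acc) (m, vs)
        = (m + ((ps.filter (fun p => decide (PySem.Int.mod p.1 c = r))).map (·.2)).sum,
           vs ++ (ps.filter (fun p => decide (PySem.Int.mod p.1 c = r))).map (fun p => p.1 + 1)) := by
  intro ps
  induction ps with
  | nil => intro m vs; simp
  | cons p rest ih =>
    intro m vs
    by_cases hp : PySem.Int.mod p.1 c = r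
    · simp only [List.foldl_cons]
      rw [if_pos hp, ih]
      simp [hp, add_assoc]
    · simp only [List.foldl_cons]
      rw [if_neg hp, ih]
      simp [hp]

-- additive fold is the sum of the mapped list.
theorem foldl_add_eq_sum_map {α : Type} (g : α → Int) :
    ∀ (l : List α) (i : Int), l.foldl (fun a j => a + g j) i = i + (l.map g).sum := by
  intro l
  induction l with
  | nil => intro i; simp
  | cons x xs ih => intro i; simp [ih, add_assoc]

-- ===== VERDICT (by name: the statement is the Claim_ definition above) =====
theorem program1_spec : Claim_equal_program1 := by
  intro n k values _hdom hpre
  unfold Spec_program1 program1 program1_alt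
  by_cases hn : n ≤ 0
  · -- the loop body never runs (n - 1 ≤ -1); both sides return (0, [])
    have hfuel : n.toNat + 1 = 1 := by omega
    have hl : program1Loop values (k + 1) 1 (n - 1) 0 [] = (0, []) := by
      simp only [program1Loop]
      rw [if_neg (by omega : ¬ (n - 1 : Int) > -1)]
    simp only [hfuel, hl, if_pos hn]
    rfl
  · have ⟨hk, hlen⟩ : 0 ≤ k ∧ n ≤ (values.length : Int) := by
      rcases hpre with h | h
      · omega
      · exact h
    have hc : (1:Int) ≤ k + 1 := by omega
    have hc0 : (0:Int) < k + 1 := by omega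
    set c := k + 1 with hcset
    set r := PySem.Int.mod (n - 1) c with hrset
    have hre : r = (n - 1) % c := PySem.Int.mod_eq_emod_of_pos hc0
    have hr0 : 0 ≤ r := by rw [hre]; exact Int.emod_nonneg _ (by omega)
    have hrc : r < c := by rw [hre]; exact Int.emod_lt_of_pos _ hc0
    -- A side: characterise the loop
    have hrun := program1Loop_eq values c hc (n.toNat + 1) (n - 1) 0 []
      (by omega)
      (by
        have h1 : (1:Int) * (↑n.toNat + 1) ≤ c * (↑n.toNat + 1) := by
          apply mul_le_mul_of_nonneg_right hc; positivity
        push_cast at h1 ⊢; omega)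
    rw [if_neg hn]
    simp only [hrun, zero_add, List.nil_append]
    -- B side: slice, enumerate, fold
    set nn := n.toNat with hnnset
    have hslice : PySem.List.slice values none (some n) = values.take n.toNat :=
      PySem.List.slice_to values (by omega)
    set nn := n.toNat with hnnset
    set pre := values.take nn with hpreset
    have hplen : pre.length = nn := by
      rw [hpreset, List.length_take]; omega
    rw [hslice, enumerate_eq_map_range pre 0, hplen]
    have hz : (fun (t : Nat) => ((0:Int) + (t : Int), pre.getD t 0)) =
        (fun (t : Nat) => ((t : Int), pre.getD t 0)) := by
      funext t; rw [zero_add]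
    rw [hz, fold_select_eq c r, List.filter_map, zero_add, List.nil_append]
    have hpred : ((fun p => decide (PySem.Int.mod p.1 c = r)) ∘
        (fun (t : Nat) => ((t : Int), pre.getD t 0))) =
        (fun (t : Nat) => decide (((t : Int)) % c = r)) := by
      funext t
      simp only [Function.comp_apply]
      rw [PySem.Int.mod_eq_emod_of_pos hc0]
    rw [hpred]
    set T := (List.range nn).filter (fun (t : Nat) => decide (((t : Int)) % c = r)) with hTset
    have hTmem : ∀ t ∈ T, t < nn := by
      intro t ht
      rw [hTset] at ht
      exact List.mem_range.mp (List.mem_filter.mp ht).1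
    have hTR : T.map (fun (t : Nat) => (t : Int)) = pvR c (n - 1) := by
      rw [hTset]
      rw [filter_range_eq_pyRange hc hr0 hrc nn]
      unfold pvR
      rw [← hrset]
      congr 1 <;> omega
    refine Prod.ext ?_ ?_
    · -- sums agree
      rw [foldl_add_eq_sum_map (fun j => PySem.List.pyGetD values j 0) (pvR c (n - 1)) 0,
          zero_add]
      show ((pvR c (n - 1)).map (fun j => PySem.List.pyGetD values j 0)).sum =
        ((T.map (fun (t : Nat) => ((t : Int), pre.getD t 0))).map (·.2)).sum
      congr 1
      calc (pvR c (n - 1)).map (fun j => PySem.List.pyGetD values j 0)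
          = (T.map (fun (t : Nat) => (t : Int))).map (fun j => PySem.List.pyGetD values j 0) := by
            rw [hTR]
        _ = T.map (fun (t : Nat) => PySem.List.pyGetD values (t : Int) 0) := by
            rw [List.map_map]; rfl
        _ = T.map (fun (t : Nat) => pre.getD t 0) := by
            refine List.map_congr_left (fun t ht => ?_)
            have htn : t < nn := hTmem t ht
            rw [PySem.List.pyGetD_natCast]
            rw [List.getD_eq_getElem?_getD, List.getD_eq_getElem?_getD, hpreset,
                List.getElem?_take_of_lt htn]
        _ = (T.map (fun (t : Nat) => ((t : Int), pre.getD t 0))).map (·.2) := by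
            rw [List.map_map]; rfl
    · -- index lists agree: A sorts the reversed ascending list back to itself
      show PySem.List.sorted (((pvR c (n - 1)).map (fun j => j + 1)).reverse) (fun x => x) false
          = (T.map (fun (t : Nat) => ((t : Int), pre.getD t 0))).map (fun p => p.1 + 1)
      have hlists : (T.map (fun (t : Nat) => ((t : Int), pre.getD t 0))).map (fun p => p.1 + 1)
          = (pvR c (n - 1)).map (fun j => j + 1) := by
        rw [List.map_map, ← hTR, List.map_map]; rfl
      rw [hlists]
      exact PySem.List.sorted_eq_of_perm_of_pairwise_lt _ _ _
        (List.reverse_perm _).symm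
        (List.Pairwise.map _ (fun a b h => by omega) (pvR_pairwise hc))
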